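-- pv_equiv track=rewrite | github.com/beshirr/DataCompression | 2D_PredictiveCoding/utilities.py | GetMaxTupleFrom2DArray
-- ===== SOURCE A (Python) =====
-- def GetMaxTupleFrom2DArray(values: list[list[tuple[int, int, int]]], ROWS: int, COLS: int) -> list[int]:
--     result: list[int] = [values[0][0][0], values[0][0][1], values[0][0][2]]
--
--     for row in range(ROWS):
--         for col in range(COLS):
--             result[0] = max(result[0], values[row][col][0])
--             result[1] = max(result[1], values[row][col][1])
--             result[2] = max(result[2], values[row][col][2])
--
--     return result
-- ===== SOURCE B (Python) =====
-- def GetMaxTupleFrom2DArray(values: list[list[tuple[int, int, int]]], ROWS: int, COLS: int) -> list[int]: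
--     seed = values[0][0]
--     flat = [values[r][c] for r in range(ROWS) for c in range(COLS)]
--     return [max([seed[0]] + [t[0] for t in flat]),
--             max([seed[1]] + [t[1] for t in flat]),
--             max([seed[2]] + [t[2] for t in flat])]
-- ===== Notes on version B (the rewrite author's own statement) =====
-- stated objective: alternative
-- what changed: Replaces A's single interleaved nested loop that mutates a 3-slot result list in place with one flattening pass over the grid followed by three independent per-component max reductions, each seeded with values[0][0][i].
import Mathlib
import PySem

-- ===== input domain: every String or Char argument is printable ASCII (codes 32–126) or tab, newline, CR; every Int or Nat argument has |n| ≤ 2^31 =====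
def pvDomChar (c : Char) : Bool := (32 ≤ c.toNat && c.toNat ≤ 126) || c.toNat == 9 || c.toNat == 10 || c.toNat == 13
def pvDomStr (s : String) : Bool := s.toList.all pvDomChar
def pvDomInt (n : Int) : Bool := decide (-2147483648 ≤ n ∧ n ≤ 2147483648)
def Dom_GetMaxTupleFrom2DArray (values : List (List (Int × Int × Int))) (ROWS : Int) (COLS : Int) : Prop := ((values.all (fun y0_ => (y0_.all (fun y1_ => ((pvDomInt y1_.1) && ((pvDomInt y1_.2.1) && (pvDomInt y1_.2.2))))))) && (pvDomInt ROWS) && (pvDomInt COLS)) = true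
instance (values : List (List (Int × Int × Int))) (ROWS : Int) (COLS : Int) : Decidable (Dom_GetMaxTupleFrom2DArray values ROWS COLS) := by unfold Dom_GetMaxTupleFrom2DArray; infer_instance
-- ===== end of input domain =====

-- B replaces A's interleaved nested loop over an in-place 3-slot result list by one
-- flattening pass plus three independent per-component max reductions (alternative
-- decomposition, same asymptotic cost).

-- Python cell access values[row][col] (indices always ≥ 0 here); Pre_ keeps it in range,
-- so the .getD defaults are never the value used on admitted inputs.
def pvCell (values : List (List (Int × Int × Int))) (row col : Int) : Int × Int × Int :=
  (PySem.List.pyGet? ((PySem.List.pyGet? values row).getD []) col).getD (0, 0, 0)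

-- ===== PORT A =====
def GetMaxTupleFrom2DArray (values : List (List (Int × Int × Int))) (ROWS : Int) (COLS : Int) : List Int :=
  let t0 := pvCell values 0 0
  let result : List Int := [t0.1, t0.2.1, t0.2.2]
  (PySem.List.pyRange 0 ROWS 1).foldl (fun result row =>
    (PySem.List.pyRange 0 COLS 1).foldl (fun result col =>
      let t := pvCell values row col
      let r0 := result.set 0 (max ((PySem.List.pyGet? result 0).getD 0) t.1)
      let r1 := r0.set 1 (max ((PySem.List.pyGet? r0 1).getD 0) t.2.1)
      r1.set 2 (max ((PySem.List.pyGet? r1 2).getD 0) t.2.2)) result) result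

-- ===== PORT B =====
def GetMaxTupleFrom2DArray_alt (values : List (List (Int × Int × Int))) (ROWS : Int) (COLS : Int) : List Int :=
  let seed := pvCell values 0 0
  let flat := (PySem.List.pyRange 0 ROWS 1).flatMap (fun r =>
    (PySem.List.pyRange 0 COLS 1).map (fun c => pvCell values r c))
  [ (PySem.List.max? (seed.1 :: flat.map (fun t => t.1)) (fun y => y)).getD 0,
    (PySem.List.max? (seed.2.1 :: flat.map (fun t => t.2.1)) (fun y => y)).getD 0,
    (PySem.List.max? (seed.2.2 :: flat.map (fun t => t.2.2)) (fun y => y)).getD 0 ]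

-- ===== PRECONDITION & SPEC =====
-- Pre_ excludes exactly the inputs where the Python raises IndexError (values[0][0]
-- missing, or a visited cell values[row][col] out of range); B raises there too.
def Pre_GetMaxTupleFrom2DArray (values : List (List (Int × Int × Int))) (ROWS : Int) (COLS : Int) : Prop :=
  values ≠ [] ∧ values.headD [] ≠ [] ∧
  (ROWS ≤ 0 ∨ COLS ≤ 0 ∨ (ROWS ≤ values.length ∧ ∀ r ∈ values.take ROWS.toNat, COLS ≤ r.length))
instance (values : List (List (Int × Int × Int))) (ROWS : Int) (COLS : Int) : Decidable (Pre_GetMaxTupleFrom2DArray values ROWS COLS) := by unfold Pre_GetMaxTupleFrom2DArray; infer_instance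

def pvWitness_GetMaxTupleFrom2DArray : (List (List (Int × Int × Int))) × Int × Int :=
  ([[(1, 2, 3), (4, 0, 2)], [(5, 1, 0), (0, 9, 1)]], 2, 2)

def Spec_GetMaxTupleFrom2DArray (values : List (List (Int × Int × Int))) (ROWS : Int) (COLS : Int) (out : List Int) : Prop := out = GetMaxTupleFrom2DArray_alt values ROWS COLS
instance (values : List (List (Int × Int × Int))) (ROWS : Int) (COLS : Int) (out : List Int) : Decidable (Spec_GetMaxTupleFrom2DArray values ROWS COLS out) := by unfold Spec_GetMaxTupleFrom2DArray; infer_instance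

-- ===== CLAIM (what is proved, stated in full; the proofs are below) =====
def Claim_equal_GetMaxTupleFrom2DArray : Prop := ∀ (values : List (List (Int × Int × Int))) (ROWS : Int) (COLS : Int), Dom_GetMaxTupleFrom2DArray values ROWS COLS → Pre_GetMaxTupleFrom2DArray values ROWS COLS → Spec_GetMaxTupleFrom2DArray values ROWS COLS (GetMaxTupleFrom2DArray values ROWS COLS)

-- ===== LEMMAS AND PROOFS =====

-- A's loop body as a standalone step on the 3-slot state list.
def pvStep (res : List Int) (t : Int × Int × Int) : List Int :=
  let r0 := res.set 0 (max ((PySem.List.pyGet? res 0).getD 0) t.1)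
  let r1 := r0.set 1 (max ((PySem.List.pyGet? r0 1).getD 0) t.2.1)
  r1.set 2 (max ((PySem.List.pyGet? r1 2).getD 0) t.2.2)

theorem pvStep_triple (a b c : Int) (t : Int × Int × Int) :
    pvStep [a, b, c] t = [max a t.1, max b t.2.1, max c t.2.2] := by
  simp [pvStep, PySem.List.pyGet?, PySem.List.pyIdx?, List.set]

theorem foldl_foldl_flatMap {α β γ : Type} (step : γ → β → γ) (rows : List α) (g : α → List β) (init : γ) :
    rows.foldl (fun acc r => (g r).foldl step acc) init = (rows.flatMap g).foldl step init := by
  induction rows generalizing init with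
  | nil => rfl
  | cons r rs ih => simp [List.flatMap_cons, List.foldl_append, ih]

theorem foldl_pvStep (L : List (Int × Int × Int)) (a b c : Int) :
    L.foldl pvStep [a, b, c] =
      [L.foldl (fun m t => max m t.1) a,
       L.foldl (fun m t => max m t.2.1) b,
       L.foldl (fun m t => max m t.2.2) c] := by
  induction L generalizing a b c with
  | nil => rfl
  | cons t ts ih => simp [List.foldl_cons, pvStep_triple, ih]

-- ===== VERDICT (by name: the statement is the Claim_ definition above) =====
theorem GetMaxTupleFrom2DArray_spec : Claim_equal_GetMaxTupleFrom2DArray := by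
  intro values ROWS COLS _ _
  unfold Spec_GetMaxTupleFrom2DArray GetMaxTupleFrom2DArray GetMaxTupleFrom2DArray_alt
  simp only [PySem.List.max?_id_cons, Option.getD_some]
  rw [show (fun (result : List Int) row =>
        (PySem.List.pyRange 0 COLS 1).foldl (fun result col =>
          let t := pvCell values row col
          let r0 := result.set 0 (max ((PySem.List.pyGet? result 0).getD 0) t.1)
          let r1 := r0.set 1 (max ((PySem.List.pyGet? r0 1).getD 0) t.2.1)
          r1.set 2 (max ((PySem.List.pyGet? r1 2).getD 0) t.2.2)) result)
      = (fun result row => (((PySem.List.pyRange 0 COLS 1).map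
          (fun col => pvCell values row col))).foldl pvStep result)
    from by funext res row; rw [List.foldl_map]; rfl]
  rw [foldl_foldl_flatMap, foldl_pvStep]
  simp [List.foldl_map]
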